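-- pv_equiv track=rewrite | github.com/vutala0/career-compass | apify-validation-run2-2026-05-02/normalize_run2.py | role_family
-- ===== SOURCE A (Python) =====
-- def role_family(title):
--     t = (title or "").lower()
--     if "founding" in t or "0 to 1" in t or "0-1 hire" in t:
--         return "generalist"
--     if any(k in t for k in ["chief of staff","cos ","founder's office","founders office","founder office"]):
--         return "generalist"
--     if any(k in t for k in ["product operations","product ops","product manager","product marketing","prd","apm","pm intern","group product"]):
--         return "product"
--     if any(k in t for k in ["business operations","biz ops","strategy and operations","strategy operations","strategy & operations","trust and safety","trust & safety","trust&safety","operations manager","operations associate","marketplace operations","program manager","operations specialist","operations lead"]):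
--         return "operations"
--     if any(k in t for k in ["customer success","customer marketing","account manager","implementation","customer support","customer experience","client success","onboarding manager"]):
--         return "customer"
--     if any(k in t for k in ["marketing","content","brand","seo","demand gen","performance marketing","community","copywriter","communications","growth marketer","social media"]):
--         return "marketing"
--     if any(k in t for k in ["business analyst","data analyst","marketing analyst","operations analyst","strategy analyst","financial analyst","insights analyst","reporting analyst","analytics specialist","analyst"]):
--         return "data-analyst"
--     if any(k in t for k in ["product designer","ux designer","ui designer","user researcher","ux researcher","design operations","design ops","interaction designer","visual designer","graphic designer","product design"]):
--         return "design"
--     if any(k in t for k in ["account executive","business development","sales development","sdr","bdr","partnerships","solutions consultant","sales engineer","sales executive","inside sales","field sales","key account","enterprise sales","strategic accounts"]):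
--         return "sales"
--     return "other"
-- ===== SOURCE B (Python) =====
-- # Position-major scan: walk every start position of the lowered title, collect the
-- # priorities of all flat (priority, keyword) entries whose keyword begins there,
-- # guarded by each keyword's first character, then return the label of the smallest priority found (no early exit, no if-chain).
-- LABELS = ["generalist", "generalist", "product", "operations", "customer",
--           "marketing", "data-analyst", "design", "sales"]
--
-- FLAT = [
--     (0, "founding"), (0, "0 to 1"), (0, "0-1 hire"),
--     (1, "chief of staff"), (1, "cos "), (1, "founder's office"), (1, "founders office"), (1, "founder office"),
--     (2, "product operations"), (2, "product ops"), (2, "product manager"), (2, "product marketing"), (2, "prd"), (2, "apm"), (2, "pm intern"), (2, "group product"),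
--     (3, "business operations"), (3, "biz ops"), (3, "strategy and operations"), (3, "strategy operations"), (3, "strategy & operations"), (3, "trust and safety"), (3, "trust & safety"), (3, "trust&safety"), (3, "operations manager"), (3, "operations associate"), (3, "marketplace operations"), (3, "program manager"), (3, "operations specialist"), (3, "operations lead"),
--     (4, "customer success"), (4, "customer marketing"), (4, "account manager"), (4, "implementation"), (4, "customer support"), (4, "customer experience"), (4, "client success"), (4, "onboarding manager"),
--     (5, "marketing"), (5, "content"), (5, "brand"), (5, "seo"), (5, "demand gen"), (5, "performance marketing"), (5, "community"), (5, "copywriter"), (5, "communications"), (5, "growth marketer"), (5, "social media"),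
--     (6, "business analyst"), (6, "data analyst"), (6, "marketing analyst"), (6, "operations analyst"), (6, "strategy analyst"), (6, "financial analyst"), (6, "insights analyst"), (6, "reporting analyst"), (6, "analytics specialist"), (6, "analyst"),
--     (7, "product designer"), (7, "ux designer"), (7, "ui designer"), (7, "user researcher"), (7, "ux researcher"), (7, "design operations"), (7, "design ops"), (7, "interaction designer"), (7, "visual designer"), (7, "graphic designer"), (7, "product design"),
--     (8, "account executive"), (8, "business development"), (8, "sales development"), (8, "sdr"), (8, "bdr"), (8, "partnerships"), (8, "solutions consultant"), (8, "sales engineer"), (8, "sales executive"), (8, "inside sales"), (8, "field sales"), (8, "key account"), (8, "enterprise sales"), (8, "strategic accounts"),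
-- ]
--
-- FLAT3 = [(p, kw, kw[0]) for p, kw in FLAT]
--
-- def role_family(title):
--     t = (title or "").lower()
--     hits = [p for i, c in enumerate(t) for p, kw, c0 in FLAT3 if c0 == c and t.startswith(kw, i)]
--     return LABELS[min(hits)] if hits else "other"
-- ===== Notes on version B (the rewrite author's own statement) =====
-- stated objective: alternative
-- what changed: Instead of an ordered early-return chain of substring membership tests per family, B does a position-major scan: it walks every start position of the lowered title, collects the priorities of all flat (priority, keyword) entries whose keyword begins at that position, and returns the label of the minimum priority collected (no early exit, no per-family 'in' tests).
import Mathlib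
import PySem

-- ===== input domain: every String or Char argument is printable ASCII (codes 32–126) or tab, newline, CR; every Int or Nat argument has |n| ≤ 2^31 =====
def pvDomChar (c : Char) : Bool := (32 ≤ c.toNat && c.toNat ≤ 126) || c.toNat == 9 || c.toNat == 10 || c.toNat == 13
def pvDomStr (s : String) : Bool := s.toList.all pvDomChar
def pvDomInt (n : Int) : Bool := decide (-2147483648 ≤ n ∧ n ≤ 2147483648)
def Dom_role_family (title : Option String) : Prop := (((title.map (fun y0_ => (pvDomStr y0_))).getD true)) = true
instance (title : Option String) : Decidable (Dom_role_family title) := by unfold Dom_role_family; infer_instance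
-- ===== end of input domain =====

-- B replaces A's ordered early-return chain of 'keyword in title' tests by a position-major
-- scan of the lowered title collecting priorities of keywords that start at each position,
-- followed by a min-priority table lookup; objective: alternative (same cost).

-- ===== PORT A =====
def role_family (title : Option String) : String :=
  let t := PySem.Str.lower (title.getD "")
  if PySem.Str.isIn "founding" t || PySem.Str.isIn "0 to 1" t || PySem.Str.isIn "0-1 hire" t then
    "generalist"
  else if (["chief of staff","cos ","founder's office","founders office","founder office"] : List String).any (fun k => PySem.Str.isIn k t) then
    "generalist"
  else if (["product operations","product ops","product manager","product marketing","prd","apm","pm intern","group product"] : List String).any (fun k => PySem.Str.isIn k t) then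
    "product"
  else if (["business operations","biz ops","strategy and operations","strategy operations","strategy & operations","trust and safety","trust & safety","trust&safety","operations manager","operations associate","marketplace operations","program manager","operations specialist","operations lead"] : List String).any (fun k => PySem.Str.isIn k t) then
    "operations"
  else if (["customer success","customer marketing","account manager","implementation","customer support","customer experience","client success","onboarding manager"] : List String).any (fun k => PySem.Str.isIn k t) then
    "customer"
  else if (["marketing","content","brand","seo","demand gen","performance marketing","community","copywriter","communications","growth marketer","social media"] : List String).any (fun k => PySem.Str.isIn k t) then
    "marketing"
  else if (["business analyst","data analyst","marketing analyst","operations analyst","strategy analyst","financial analyst","insights analyst","reporting analyst","analytics specialist","analyst"] : List String).any (fun k => PySem.Str.isIn k t) then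
    "data-analyst"
  else if (["product designer","ux designer","ui designer","user researcher","ux researcher","design operations","design ops","interaction designer","visual designer","graphic designer","product design"] : List String).any (fun k => PySem.Str.isIn k t) then
    "design"
  else if (["account executive","business development","sales development","sdr","bdr","partnerships","solutions consultant","sales engineer","sales executive","inside sales","field sales","key account","enterprise sales","strategic accounts"] : List String).any (fun k => PySem.Str.isIn k t) then
    "sales"
  else
    "other"

-- ===== PORT B =====
def pvLabels : List String :=
  ["generalist", "generalist", "product", "operations", "customer",
   "marketing", "data-analyst", "design", "sales"]

def pvFlat : List (Nat × String) :=
  [ (0, "founding"), (0, "0 to 1"), (0, "0-1 hire"),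
    (1, "chief of staff"), (1, "cos "), (1, "founder's office"), (1, "founders office"), (1, "founder office"),
    (2, "product operations"), (2, "product ops"), (2, "product manager"), (2, "product marketing"), (2, "prd"), (2, "apm"), (2, "pm intern"), (2, "group product"),
    (3, "business operations"), (3, "biz ops"), (3, "strategy and operations"), (3, "strategy operations"), (3, "strategy & operations"), (3, "trust and safety"), (3, "trust & safety"), (3, "trust&safety"), (3, "operations manager"), (3, "operations associate"), (3, "marketplace operations"), (3, "program manager"), (3, "operations specialist"), (3, "operations lead"),
    (4, "customer success"), (4, "customer marketing"), (4, "account manager"), (4, "implementation"), (4, "customer support"), (4, "customer experience"), (4, "client success"), (4, "onboarding manager"),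
    (5, "marketing"), (5, "content"), (5, "brand"), (5, "seo"), (5, "demand gen"), (5, "performance marketing"), (5, "community"), (5, "copywriter"), (5, "communications"), (5, "growth marketer"), (5, "social media"),
    (6, "business analyst"), (6, "data analyst"), (6, "marketing analyst"), (6, "operations analyst"), (6, "strategy analyst"), (6, "financial analyst"), (6, "insights analyst"), (6, "reporting analyst"), (6, "analytics specialist"), (6, "analyst"),
    (7, "product designer"), (7, "ux designer"), (7, "ui designer"), (7, "user researcher"), (7, "ux researcher"), (7, "design operations"), (7, "design ops"), (7, "interaction designer"), (7, "visual designer"), (7, "graphic designer"), (7, "product design"),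
    (8, "account executive"), (8, "business development"), (8, "sales development"), (8, "sdr"), (8, "bdr"), (8, "partnerships"), (8, "solutions consultant"), (8, "sales engineer"), (8, "sales executive"), (8, "inside sales"), (8, "field sales"), (8, "key account"), (8, "enterprise sales"), (8, "strategic accounts") ]

-- FLAT3 = [(p, kw, kw[0]) for p, kw in FLAT]; kw[0] is ported as headD — exact, every keyword is nonempty
def pvFlat3 : List (Nat × String × Char) :=
  pvFlat.map (fun pk => (pk.1, pk.2, pk.2.toList.headD ' '))

-- the comprehension '[p for i, c in enumerate(t) for p, kw, c0 in FLAT3 if c0 == c and t.startswith(kw, i)]';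
-- 't.startswith(kw, i)' is ported as Chars.startswith of (t.drop i.toNat) — exact here since 0 ≤ i
def pvHits (t : List Char) : List Nat :=
  (PySem.List.enumerate t).flatMap (fun ic =>
    pvFlat3.filterMap (fun pk =>
      if pk.2.2 == ic.2 && PySem.Chars.startswith (t.drop ic.1.toNat) pk.2.1.toList then some pk.1 else none))

def role_family_alt (title : Option String) : String :=
  let t := (PySem.Str.lower (title.getD "")).toList
  match PySem.List.min? (pvHits t) (fun p => p) with
  | none => "other"
  | some m => pvLabels.getD m ""   -- LABELS[min(hits)]: the index is always < 9, so plain getD is exact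

-- ===== PRECONDITION & SPEC =====
def Spec_role_family (title : Option String) (out : String) : Prop := out = role_family_alt title
instance (title : Option String) (out : String) : Decidable (Spec_role_family title out) := by unfold Spec_role_family; infer_instance

-- ===== CLAIM (what is proved, stated in full; the proofs are below) =====
def Claim_equal_role_family : Prop := ∀ (title : Option String), Dom_role_family title → Spec_role_family title (role_family title)

-- ===== LEMMAS AND PROOFS =====

-- the keyword group of each priority, as A's literal lists
def grp : Nat → List String
  | 0 => ["founding","0 to 1","0-1 hire"]
  | 1 => ["chief of staff","cos ","founder's office","founders office","founder office"]
  | 2 => ["product operations","product ops","product manager","product marketing","prd","apm","pm intern","group product"]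
  | 3 => ["business operations","biz ops","strategy and operations","strategy operations","strategy & operations","trust and safety","trust & safety","trust&safety","operations manager","operations associate","marketplace operations","program manager","operations specialist","operations lead"]
  | 4 => ["customer success","customer marketing","account manager","implementation","customer support","customer experience","client success","onboarding manager"]
  | 5 => ["marketing","content","brand","seo","demand gen","performance marketing","community","copywriter","communications","growth marketer","social media"]
  | 6 => ["business analyst","data analyst","marketing analyst","operations analyst","strategy analyst","financial analyst","insights analyst","reporting analyst","analytics specialist","analyst"]
  | 7 => ["product designer","ux designer","ui designer","user researcher","ux researcher","design operations","design ops","interaction designer","visual designer","graphic designer","product design"]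
  | 8 => ["account executive","business development","sales development","sdr","bdr","partnerships","solutions consultant","sales engineer","sales executive","inside sales","field sales","key account","enterprise sales","strategic accounts"]
  | _ => []

lemma flat_fst_lt : ∀ q ∈ pvFlat, q.1 < 9 := by decide

lemma flat_snd_ne : ∀ q ∈ pvFlat, (q.2 : String).toList ≠ [] := by decide

lemma flat_char (p : Nat) (kw : String) : (p, kw) ∈ pvFlat ↔ p < 9 ∧ kw ∈ grp p := by
  constructor
  · intro h
    have hp : p < 9 := flat_fst_lt _ h
    refine ⟨hp, ?_⟩
    interval_cases p <;> simp_all [pvFlat, grp]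
  · rintro ⟨hp, hm⟩
    interval_cases p <;> simp_all [pvFlat, grp]

lemma hits_char (t : List Char) (p : Nat) :
    p ∈ pvHits t ↔ ∃ kw, (p, kw) ∈ pvFlat ∧ PySem.Chars.isIn kw.toList t = true := by
  constructor
  · intro h
    simp only [pvHits, List.mem_flatMap, List.mem_filterMap] at h
    obtain ⟨ic, hen, pk3, hm3, hif⟩ := h
    by_cases hc : (pk3.2.2 == ic.2 && PySem.Chars.startswith (t.drop ic.1.toNat) pk3.2.1.toList) = true
    · rw [if_pos hc] at hif
      obtain rfl : pk3.1 = p := by simpa using hif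
      obtain ⟨-, hsw⟩ := Bool.and_eq_true_iff.mp hc
      obtain ⟨pk, hm, hpk⟩ := List.mem_map.mp hm3
      refine ⟨pk3.2.1, ?_, ?_⟩
      · have h1 : pk.1 = pk3.1 := by rw [← hpk]
        have h2 : pk.2 = pk3.2.1 := by rw [← hpk]
        rwa [← h1, ← h2, Prod.mk.eta]
      · exact (PySem.Chars.exists_prefix_drop_iff_isIn _ _).mp
          ⟨ic.1.toNat, (PySem.Chars.startswith_iff _ _).mp hsw⟩
    · rw [if_neg hc] at hif; cases hif
  · rintro ⟨kw, hm, hin⟩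
    obtain ⟨j, hpre⟩ := (PySem.Chars.exists_prefix_drop_iff_isIn kw.toList t).mpr hin
    have hne : kw.toList ≠ [] := flat_snd_ne _ hm
    have hj : j < t.length := by
      by_contra hj
      have : t.drop j = [] := List.drop_eq_nil_of_le (by omega)
      rw [this, List.prefix_nil] at hpre
      exact hne hpre
    obtain ⟨hd, tl, hkw⟩ : ∃ hd tl, kw.toList = hd :: tl := by
      cases hkwl : kw.toList with
      | nil => exact absurd hkwl hne
      | cons a l => exact ⟨a, l, rfl⟩
    have hhd : t[j] = hd := by
      have h1 : (t.drop j).head? = some hd := by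
        obtain ⟨rest, hrest⟩ := hpre
        rw [hkw] at hrest
        rw [← hrest]; rfl
      rw [List.head?_drop] at h1
      have := List.getElem?_eq_getElem hj
      rw [this] at h1
      exact Option.some_inj.mp h1
    simp only [pvHits, List.mem_flatMap, List.mem_filterMap]
    refine ⟨((j : Int), t[j]), ?_, (p, kw, kw.toList.headD ' '), ?_, ?_⟩
    · exact (PySem.List.mem_enumerate_iff _ _ _).mpr ⟨j, hj, by simp⟩
    · exact List.mem_map.mpr ⟨(p, kw), hm, rfl⟩
    · have hsw : PySem.Chars.startswith (t.drop ((j : Int)).toNat) kw.toList = true := by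
        rw [Int.toNat_natCast]
        exact (PySem.Chars.startswith_iff _ _).mpr hpre
      have hc0 : (kw.toList.headD ' ' == t[j]) = true := by
        rw [hkw, hhd]; simp
      rw [if_pos (by simp only [hc0, hsw, Bool.and_self])]

lemma hits_iff (t : List Char) (p : Nat) :
    p ∈ pvHits t ↔ p < 9 ∧ (grp p).any (fun kw => PySem.Chars.isIn kw.toList t) = true := by
  rw [hits_char]
  constructor
  · rintro ⟨kw, hm, hin⟩
    obtain ⟨hp, hg⟩ := (flat_char p kw).mp hm
    exact ⟨hp, List.any_eq_true.mpr ⟨kw, hg, hin⟩⟩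
  · rintro ⟨hp, ha⟩
    obtain ⟨kw, hg, hin⟩ := List.any_eq_true.mp ha
    exact ⟨kw, (flat_char p kw).mpr ⟨hp, hg⟩, hin⟩

lemma min_hits_eq (t : List Char) (k : Nat) (hk : k ∈ pvHits t)
    (hlow : ∀ j < k, j ∉ pvHits t) :
    PySem.List.min? (pvHits t) (fun p => p) = some k := by
  cases h : PySem.List.min? (pvHits t) (fun p => p) with
  | none =>
      rw [PySem.List.min?_eq_none_iff] at h
      rw [h] at hk; cases hk
  | some m =>
      have hm : m ∈ pvHits t := PySem.List.min?_mem h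
      have hle : m ≤ k := PySem.List.min?_isMin h k hk
      have : ¬ m < k := fun hlt => hlow m hlt hm
      have : m = k := by omega
      rw [this]

-- ===== VERDICT (by name: the statement is the Claim_ definition above) =====
set_option maxHeartbeats 1000000 in
theorem role_family_spec : Claim_equal_role_family := by
  intro title _
  unfold Spec_role_family role_family role_family_alt
  simp only [PySem.Str.isIn_eq]
  split_ifs with h0 h1 h2 h3 h4 h5 h6 h7 h8
  · rw [min_hits_eq _ 0 ((hits_iff _ 0).mpr ⟨by omega, by simpa [grp, or_assoc] using h0⟩)
      (by omega)]
    rfl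
  · rw [min_hits_eq _ 1 ((hits_iff _ 1).mpr ⟨by omega, by simpa [grp] using h1⟩)
      (by intro j hj hmem
          obtain ⟨_, hany⟩ := (hits_iff _ j).mp hmem
          interval_cases j
          · exact h0 (by simpa [grp, or_assoc] using hany))]
    rfl
  · rw [min_hits_eq _ 2 ((hits_iff _ 2).mpr ⟨by omega, by simpa [grp] using h2⟩)
      (by intro j hj hmem
          obtain ⟨_, hany⟩ := (hits_iff _ j).mp hmem
          interval_cases j
          · exact h0 (by simpa [grp, or_assoc] using hany)
          · exact h1 (by simpa [grp] using hany))]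
    rfl
  · rw [min_hits_eq _ 3 ((hits_iff _ 3).mpr ⟨by omega, by simpa [grp] using h3⟩)
      (by intro j hj hmem
          obtain ⟨_, hany⟩ := (hits_iff _ j).mp hmem
          interval_cases j
          · exact h0 (by simpa [grp, or_assoc] using hany)
          · exact h1 (by simpa [grp] using hany)
          · exact h2 (by simpa [grp] using hany))]
    rfl
  · rw [min_hits_eq _ 4 ((hits_iff _ 4).mpr ⟨by omega, by simpa [grp] using h4⟩)
      (by intro j hj hmem
          obtain ⟨_, hany⟩ := (hits_iff _ j).mp hmem
          interval_cases j
          · exact h0 (by simpa [grp, or_assoc] using hany)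
          · exact h1 (by simpa [grp] using hany)
          · exact h2 (by simpa [grp] using hany)
          · exact h3 (by simpa [grp] using hany))]
    rfl
  · rw [min_hits_eq _ 5 ((hits_iff _ 5).mpr ⟨by omega, by simpa [grp] using h5⟩)
      (by intro j hj hmem
          obtain ⟨_, hany⟩ := (hits_iff _ j).mp hmem
          interval_cases j
          · exact h0 (by simpa [grp, or_assoc] using hany)
          · exact h1 (by simpa [grp] using hany)
          · exact h2 (by simpa [grp] using hany)
          · exact h3 (by simpa [grp] using hany)
          · exact h4 (by simpa [grp] using hany))]
    rfl
  · rw [min_hits_eq _ 6 ((hits_iff _ 6).mpr ⟨by omega, by simpa [grp] using h6⟩)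
      (by intro j hj hmem
          obtain ⟨_, hany⟩ := (hits_iff _ j).mp hmem
          interval_cases j
          · exact h0 (by simpa [grp, or_assoc] using hany)
          · exact h1 (by simpa [grp] using hany)
          · exact h2 (by simpa [grp] using hany)
          · exact h3 (by simpa [grp] using hany)
          · exact h4 (by simpa [grp] using hany)
          · exact h5 (by simpa [grp] using hany))]
    rfl
  · rw [min_hits_eq _ 7 ((hits_iff _ 7).mpr ⟨by omega, by simpa [grp] using h7⟩)
      (by intro j hj hmem
          obtain ⟨_, hany⟩ := (hits_iff _ j).mp hmem
          interval_cases j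
          · exact h0 (by simpa [grp, or_assoc] using hany)
          · exact h1 (by simpa [grp] using hany)
          · exact h2 (by simpa [grp] using hany)
          · exact h3 (by simpa [grp] using hany)
          · exact h4 (by simpa [grp] using hany)
          · exact h5 (by simpa [grp] using hany)
          · exact h6 (by simpa [grp] using hany))]
    rfl
  · rw [min_hits_eq _ 8 ((hits_iff _ 8).mpr ⟨by omega, by simpa [grp] using h8⟩)
      (by intro j hj hmem
          obtain ⟨_, hany⟩ := (hits_iff _ j).mp hmem
          interval_cases j
          · exact h0 (by simpa [grp, or_assoc] using hany)
          · exact h1 (by simpa [grp] using hany)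
          · exact h2 (by simpa [grp] using hany)
          · exact h3 (by simpa [grp] using hany)
          · exact h4 (by simpa [grp] using hany)
          · exact h5 (by simpa [grp] using hany)
          · exact h6 (by simpa [grp] using hany)
          · exact h7 (by simpa [grp] using hany))]
    rfl
  · have hnil : pvHits (PySem.Str.lower (title.getD "")).toList = [] := by
      rw [List.eq_nil_iff_forall_not_mem]
      intro p hmem
      obtain ⟨hp9, hany⟩ := (hits_iff _ p).mp hmem
      interval_cases p
      · exact h0 (by simpa [grp, or_assoc] using hany)
      · exact h1 (by simpa [grp] using hany)
      · exact h2 (by simpa [grp] using hany)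
      · exact h3 (by simpa [grp] using hany)
      · exact h4 (by simpa [grp] using hany)
      · exact h5 (by simpa [grp] using hany)
      · exact h6 (by simpa [grp] using hany)
      · exact h7 (by simpa [grp] using hany)
      · exact h8 (by simpa [grp] using hany)
    rw [hnil]
    rfl
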